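-- pv_equiv track=rewrite | github.com/oliveroliverio/TL-shortcut_img2markdown | img2markdown.py | prep_for_pasting
-- ===== SOURCE A (Python) =====
-- def prep_for_pasting(markdown_text):
--     """
--     Prepare markdown text for pasting by:
--     1. Converting first level headers to third level headers
--     2. Converting second level headers to bold text
--     3. Removing triple backtick markdown designations
--     """
--     # Remove triple backtick markdown designations at the beginning and end
--     if markdown_text.startswith("```markdown\n"):
--         markdown_text = markdown_text[len("```markdown\n"):]
--     if markdown_text.startswith("```\n"):
--         markdown_text = markdown_text[len("```\n"):]
--     if markdown_text.endswith("\n```"):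
--         markdown_text = markdown_text[:-4]
--
--     # Process lines
--     lines = markdown_text.split('\n')
--     processed_lines = []
--
--     for line in lines:
--         # Convert first level headers to third level headers
--         if line.startswith("# "):
--             processed_lines.append("### " + line[2:])
--         # Convert second level headers to bold text
--         elif line.startswith("## "):
--             processed_lines.append("**" + line[3:] + "**")
--         else:
--             processed_lines.append(line)
--
--     return '\n'.join(processed_lines)
-- ===== SOURCE B (Python) =====
-- def prep_for_pasting(markdown_text):
--     t = markdown_text
--     if t.startswith("```markdown\n"):
--         t = t[12:]
--     if t.startswith("```\n"):
--         t = t[4:]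
--     if t.endswith("\n```"):
--         t = t[:-4]
--     # single-pass character state machine: no split/join, no per-line list
--     out = []
--     st = 0  # 0 line start, 1 seen '#', 2 seen '##', 3 mid-line plain, 4 mid-line bolded
--     for ch in t:
--         if st == 0:
--             if ch == '#':
--                 st = 1
--             elif ch == '\n':
--                 out.append('\n')
--             else:
--                 out.append(ch)
--                 st = 3
--         elif st == 1:
--             if ch == '#':
--                 st = 2
--             elif ch == ' ':
--                 out.append('### ')
--                 st = 3
--             elif ch == '\n':
--                 out.append('#\n')
--                 st = 0
--             else:
--                 out.append('#')
--                 out.append(ch)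
--                 st = 3
--         elif st == 2:
--             if ch == ' ':
--                 out.append('**')
--                 st = 4
--             elif ch == '\n':
--                 out.append('##\n')
--                 st = 0
--             else:
--                 out.append('##')
--                 out.append(ch)
--                 st = 3
--         elif st == 3:
--             if ch == '\n':
--                 out.append('\n')
--                 st = 0
--             else:
--                 out.append(ch)
--         else:  # st == 4
--             if ch == '\n':
--                 out.append('**\n')
--                 st = 0
--             else:
--                 out.append(ch)
--     if st == 1:
--         out.append('#')
--     elif st == 2:
--         out.append('##')
--     elif st == 4:
--         out.append('**')
--     return ''.join(out)
-- ===== Notes on version B (the rewrite author's own statement) =====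
-- stated objective: alternative
-- what changed: B replaces A's split-into-lines + per-line prefix tests + join with a single left-to-right character-level state machine (5 states) that rewrites headers as it streams, never materialising a list of lines.
import Mathlib
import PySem

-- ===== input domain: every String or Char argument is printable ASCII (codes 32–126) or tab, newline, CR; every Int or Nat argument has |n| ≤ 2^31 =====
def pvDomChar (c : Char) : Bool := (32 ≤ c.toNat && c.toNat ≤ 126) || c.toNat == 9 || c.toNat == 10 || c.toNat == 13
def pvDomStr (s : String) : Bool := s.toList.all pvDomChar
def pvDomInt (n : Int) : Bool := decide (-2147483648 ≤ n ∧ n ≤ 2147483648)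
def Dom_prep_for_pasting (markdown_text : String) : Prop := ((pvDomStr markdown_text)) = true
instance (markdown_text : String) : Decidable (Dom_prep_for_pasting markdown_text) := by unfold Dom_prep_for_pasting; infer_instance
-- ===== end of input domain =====

-- B replaces A's split('\n')/per-line loop/join by a single-pass character state machine; same return value.

-- ===== PORT A =====
-- A-side helper: the body of A's per-line loop (the three branches, in order)
def pvTf (line : List Char) : List Char :=
  if PySem.Chars.startswith line ['#', ' '] then
    ['#', '#', '#', ' '] ++ PySem.List.slice line (some 2) none
  else if PySem.Chars.startswith line ['#', '#', ' '] then
    ['*', '*'] ++ PySem.List.slice line (some 3) none ++ ['*', '*']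
  else line

def prep_for_pasting (markdown_text : String) : String :=
  let t0 := markdown_text.toList
  let t1 := if PySem.Chars.startswith t0 ("```markdown\n".toList) then PySem.List.slice t0 (some 12) none else t0
  let t2 := if PySem.Chars.startswith t1 ("```\n".toList) then PySem.List.slice t1 (some 4) none else t1
  let t3 := if PySem.Chars.endswith t2 ("\n```".toList) then PySem.List.slice t2 none (some (-4)) else t2
  let lines := PySem.Chars.splitOn t3 ['\n']
  let processed := lines.foldl (fun acc line => acc ++ [pvTf line]) []
  String.ofList (PySem.Chars.join ['\n'] processed)

-- ===== PORT B =====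
-- B-side helper: the for-loop over characters; state 0 = line start, 1 = seen '#',
-- 2 = seen '##', 3 = mid-line plain, 4 = mid-line inside a bolded header body.
def pvGo : Nat → List Char → List Char
  | 1, [] => ['#']
  | 2, [] => ['#', '#']
  | 4, [] => ['*', '*']
  | _, [] => []
  | 0, c :: cs =>
      if c = '#' then pvGo 1 cs
      else if c = '\n' then '\n' :: pvGo 0 cs
      else c :: pvGo 3 cs
  | 1, c :: cs =>
      if c = '#' then pvGo 2 cs
      else if c = ' ' then '#' :: '#' :: '#' :: ' ' :: pvGo 3 cs
      else if c = '\n' then '#' :: '\n' :: pvGo 0 cs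
      else '#' :: c :: pvGo 3 cs
  | 2, c :: cs =>
      if c = ' ' then '*' :: '*' :: pvGo 4 cs
      else if c = '\n' then '#' :: '#' :: '\n' :: pvGo 0 cs
      else '#' :: '#' :: c :: pvGo 3 cs
  | 3, c :: cs =>
      if c = '\n' then '\n' :: pvGo 0 cs else c :: pvGo 3 cs
  | _, c :: cs =>
      if c = '\n' then '*' :: '*' :: '\n' :: pvGo 0 cs else c :: pvGo 4 cs

def prep_for_pasting_alt (markdown_text : String) : String :=
  let t0 := markdown_text.toList
  let t1 := if PySem.Chars.startswith t0 ("```markdown\n".toList) then PySem.List.slice t0 (some 12) none else t0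
  let t2 := if PySem.Chars.startswith t1 ("```\n".toList) then PySem.List.slice t1 (some 4) none else t1
  let t3 := if PySem.Chars.endswith t2 ("\n```".toList) then PySem.List.slice t2 none (some (-4)) else t2
  String.ofList (pvGo 0 t3)

-- ===== PRECONDITION & SPEC =====
def Spec_prep_for_pasting (markdown_text : String) (out : String) : Prop := out = prep_for_pasting_alt markdown_text
instance (markdown_text : String) (out : String) : Decidable (Spec_prep_for_pasting markdown_text out) := by unfold Spec_prep_for_pasting; infer_instance

-- ===== CLAIM (what is proved, stated in full; the proofs are below) =====
def Claim_equal_prep_for_pasting : Prop := ∀ (markdown_text : String), Dom_prep_for_pasting markdown_text → Spec_prep_for_pasting markdown_text (prep_for_pasting markdown_text)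

-- ===== LEMMAS AND PROOFS =====

-- clean structural version of split('\n')
def pvSplit : List Char → List (List Char)
  | [] => [[]]
  | c :: cs =>
      match pvSplit cs with
      | [] => [[]]
      | l :: ls => if c = '\n' then [] :: l :: ls else (c :: l) :: ls

theorem pvSplit_ne_nil (cs : List Char) : pvSplit cs ≠ [] := by
  cases cs with
  | nil => simp [pvSplit]
  | cons c cs =>
      simp only [pvSplit]
      rcases hx : pvSplit cs with _ | ⟨l, ls⟩
      · simp
      · by_cases hc : c = '\n' <;> simp [hc]

-- splitOn.go with fuel, related to pvSplit
theorem pvGo_splitOn (fuel : Nat) (l cur : List Char) (acc : List (List Char))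
    (h : l.length < fuel) :
    PySem.Chars.splitOn.go ['\n'] fuel l cur acc =
      acc.reverse ++ (match pvSplit l with
        | [] => []
        | x :: xs => (cur.reverse ++ x) :: xs) := by
  induction fuel generalizing l cur acc with
  | zero => omega
  | succ n ih =>
    cases l with
    | nil => simp [PySem.Chars.splitOn.go, pvSplit]
    | cons c rest =>
      simp only [PySem.Chars.splitOn.go]
      by_cases hc : c = '\n'
      · subst hc
        have hpre : ['\n'].isPrefixOf ('\n' :: rest) = true := by simp [List.isPrefixOf]
        rw [if_pos hpre]
        have hd : List.drop (['\n'] : List Char).length ('\n' :: rest) = rest := rfl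
        rw [hd]
        rw [ih rest [] (cur.reverse :: acc) (by simpa using Nat.lt_of_succ_lt_succ h)]
        simp only [pvSplit]
        cases hs : pvSplit rest with
        | nil => exact absurd hs (pvSplit_ne_nil rest)
        | cons x xs => simp
      · have hpre : ['\n'].isPrefixOf (c :: rest) = false := by
          simp [List.isPrefixOf, Ne.symm hc]
        rw [if_neg (by simp [hpre])]
        rw [ih rest (c :: cur) acc (by simpa using Nat.lt_of_succ_lt_succ h)]
        simp only [pvSplit]
        cases hs : pvSplit rest with
        | nil => exact absurd hs (pvSplit_ne_nil rest)
        | cons x xs => simp [hc]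

theorem splitOn_eq_pvSplit (cs : List Char) :
    PySem.Chars.splitOn cs ['\n'] = pvSplit cs := by
  have := pvGo_splitOn (cs.length + 1) cs [] [] (by omega)
  simp only [PySem.Chars.splitOn, this]
  cases hs : pvSplit cs with
  | nil => exact absurd hs (pvSplit_ne_nil cs)
  | cons x xs => simp

-- the tail part of the joined output
def pvT (ls : List (List Char)) : List Char := (ls.map (fun x => '\n' :: pvTf x)).flatten

theorem icat_eq (l : List Char) (ls : List (List Char)) :
    ['\n'].intercalate (l :: ls) = l ++ (ls.map (fun x => '\n' :: x)).flatten := by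
  induction ls generalizing l with
  | nil => simp [List.intercalate]
  | cons y ys ih =>
    have := ih y
    simp only [List.intercalate, List.intersperse] at *
    simp [List.flatten, this]

-- evaluation facts about pvTf
theorem pvTf_nil : pvTf [] = [] := by decide

theorem pvTf_hash_space (x : List Char) : pvTf ('#' :: ' ' :: x) = '#' :: '#' :: '#' :: ' ' :: x := by
  simp [pvTf, PySem.Chars.startswith, List.isPrefixOf, pysem]

theorem pvTf_hash2_space (x : List Char) : pvTf ('#' :: '#' :: ' ' :: x) = '*' :: '*' :: (x ++ ['*', '*']) := by
  simp [pvTf, PySem.Chars.startswith, List.isPrefixOf, pysem]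

theorem pvTf_other (c : Char) (x : List Char) (hc : c ≠ '#') : pvTf (c :: x) = c :: x := by
  simp [pvTf, PySem.Chars.startswith, List.isPrefixOf, Ne.symm hc]

theorem pvTf_hash_other (c : Char) (x : List Char) (h1 : c ≠ '#') (h2 : c ≠ ' ') :
    pvTf ('#' :: c :: x) = '#' :: c :: x := by
  simp [pvTf, PySem.Chars.startswith, List.isPrefixOf, Ne.symm h1, Ne.symm h2]

theorem pvTf_hash2_other (c : Char) (x : List Char) (h2 : c ≠ ' ') :
    pvTf ('#' :: '#' :: c :: x) = '#' :: '#' :: c :: x := by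
  simp [pvTf, PySem.Chars.startswith, List.isPrefixOf, Ne.symm h2]

theorem pvTf_hash : pvTf ['#'] = ['#'] := by decide
theorem pvTf_hash2 : pvTf ['#', '#'] = ['#', '#'] := by decide

-- reduction rules for pvGo (definitional)
theorem pvGo0_cons (c : Char) (cs : List Char) :
    pvGo 0 (c :: cs) = if c = '#' then pvGo 1 cs else if c = '\n' then '\n' :: pvGo 0 cs else c :: pvGo 3 cs := rfl
theorem pvGo1_cons (c : Char) (cs : List Char) :
    pvGo 1 (c :: cs) = if c = '#' then pvGo 2 cs else if c = ' ' then '#' :: '#' :: '#' :: ' ' :: pvGo 3 cs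
      else if c = '\n' then '#' :: '\n' :: pvGo 0 cs else '#' :: c :: pvGo 3 cs := rfl
theorem pvGo2_cons (c : Char) (cs : List Char) :
    pvGo 2 (c :: cs) = if c = ' ' then '*' :: '*' :: pvGo 4 cs
      else if c = '\n' then '#' :: '#' :: '\n' :: pvGo 0 cs else '#' :: '#' :: c :: pvGo 3 cs := rfl
theorem pvGo3_cons (c : Char) (cs : List Char) :
    pvGo 3 (c :: cs) = if c = '\n' then '\n' :: pvGo 0 cs else c :: pvGo 3 cs := rfl
theorem pvGo4_cons (c : Char) (cs : List Char) :
    pvGo 4 (c :: cs) = if c = '\n' then '*' :: '*' :: '\n' :: pvGo 0 cs else c :: pvGo 4 cs := rfl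

-- the five-state invariant, proved in one induction
theorem pvGo_inv (cs : List Char) :
    ∀ l ls, pvSplit cs = l :: ls →
      pvGo 0 cs = pvTf l ++ pvT ls ∧
      pvGo 1 cs = pvTf ('#' :: l) ++ pvT ls ∧
      pvGo 2 cs = pvTf ('#' :: '#' :: l) ++ pvT ls ∧
      pvGo 3 cs = l ++ pvT ls ∧
      pvGo 4 cs = l ++ ['*', '*'] ++ pvT ls := by
  induction cs with
  | nil =>
    intro l ls h
    simp only [pvSplit] at h
    cases h
    simp [pvGo, pvT, pvTf_nil, pvTf_hash, pvTf_hash2]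
  | cons c cs ih =>
    intro l ls h
    obtain ⟨l', ls', hs⟩ : ∃ l' ls', pvSplit cs = l' :: ls' := by
      cases hx : pvSplit cs with
      | nil => exact absurd hx (pvSplit_ne_nil cs)
      | cons a b => exact ⟨a, b, rfl⟩
    obtain ⟨ih0, ih1, ih2, ih3, ih4⟩ := ih l' ls' hs
    simp only [pvSplit, hs] at h
    by_cases hnl : c = '\n'
    · subst hnl
      rw [if_pos rfl] at h
      cases h
      refine ⟨?_, ?_, ?_, ?_, ?_⟩ <;>
        simp [pvGo0_cons, pvGo1_cons, pvGo2_cons, pvGo3_cons, pvGo4_cons,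
          ih0, pvT, pvTf_nil, pvTf_hash, pvTf_hash2]
    · rw [if_neg hnl] at h
      cases h
      by_cases hh : c = '#'
      · subst hh
        refine ⟨?_, ?_, ?_, ?_, ?_⟩
        · simpa [pvGo0_cons] using ih1
        · simpa [pvGo1_cons] using ih2
        · rw [pvGo2_cons, if_neg (by decide), if_neg (by decide),
            pvTf_hash2_other '#' l' (by decide), ih3]
          simp
        · rw [pvGo3_cons, if_neg (by decide), ih3]
          simp
        · rw [pvGo4_cons, if_neg (by decide), ih4]
          simp
      · by_cases hsp : c = ' '
        · subst hsp
          refine ⟨?_, ?_, ?_, ?_, ?_⟩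
          · rw [pvGo0_cons, if_neg (by decide), if_neg (by decide),
              pvTf_other ' ' l' (by decide), ih3]
            simp
          · rw [pvGo1_cons, if_neg (by decide), if_pos rfl, pvTf_hash_space, ih3]
            simp
          · rw [pvGo2_cons, if_pos rfl, pvTf_hash2_space, ih4]
            simp
          · rw [pvGo3_cons, if_neg (by decide), ih3]
            simp
          · rw [pvGo4_cons, if_neg (by decide), ih4]
            simp
        · refine ⟨?_, ?_, ?_, ?_, ?_⟩
          · rw [pvGo0_cons, if_neg hh, if_neg hnl, pvTf_other c l' hh, ih3]
            simp
          · rw [pvGo1_cons, if_neg hh, if_neg hsp, if_neg hnl,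
              pvTf_hash_other c l' hh hsp, ih3]
            simp
          · rw [pvGo2_cons, if_neg hsp, if_neg hnl, pvTf_hash2_other c l' hsp, ih3]
            simp
          · rw [pvGo3_cons, if_neg hnl, ih3]
            simp
          · rw [pvGo4_cons, if_neg hnl, ih4]
            simp

-- core equality after the fence stripping
theorem pvCore (cs : List Char) :
    PySem.Chars.join ['\n'] ((PySem.Chars.splitOn cs ['\n']).foldl (fun acc line => acc ++ [pvTf line]) []) = pvGo 0 cs := by
  obtain ⟨l, ls, hs⟩ : ∃ l ls, pvSplit cs = l :: ls := by
    cases hx : pvSplit cs with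
    | nil => exact absurd hx (pvSplit_ne_nil cs)
    | cons a b => exact ⟨a, b, rfl⟩
  rw [splitOn_eq_pvSplit, PySem.List.foldl_append_singleton_eq_map, hs]
  rw [(pvGo_inv cs l ls hs).1]
  simp only [PySem.Chars.join, List.nil_append, List.map_cons, icat_eq, pvT, List.map_map]
  rfl

-- ===== VERDICT (by name: the statement is the Claim_ definition above) =====
theorem prep_for_pasting_spec : Claim_equal_prep_for_pasting := by
  intro s _
  unfold Spec_prep_for_pasting prep_for_pasting prep_for_pasting_alt
  exact congrArg String.ofList (pvCore _)
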